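-- pv_equiv track=rewrite | github.com/farhanreynaldo/AoC2021 | day09.py | is_lowest
-- ===== SOURCE A (Python) =====
-- from itertools import product
--
-- def find_adjacents(point):
--     adjacents = [(-1, 0), (1, 0), (0, -1), (0, 1)]  # up, right, left, down
--     x, y = point
--     for xi, yi in adjacents:
--         yield x + xi, y + yi
--
-- def is_lowest(input):
--     matrix = [[int(col) for col in row] for row in input.strip().split("\n")]
--     n_row, n_col = len(matrix), len(matrix[0])
--     total = 0
--     for x, y in product(range(n_row), range(n_col)):
--         if all(
--             matrix[x][y] < matrix[xi][yi]
--             for xi, yi in find_adjacents((x, y))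
--             if xi >= 0 and xi < n_row and yi >= 0 and yi < n_col
--         ):
--             total += matrix[x][y] + 1
--     return total
-- ===== SOURCE B (Python) =====
-- def is_lowest(input):
--     matrix = [[int(col) for col in row] for row in input.strip().split("\n")]
--     n_row, n_col = len(matrix), len(matrix[0])
--     low = [[True] * n_col for _ in range(n_row)]
--     for dx, dy in ((-1, 0), (1, 0), (0, -1), (0, 1)):
--         low = [[low[x][y]
--                 and not (0 <= x + dx < n_row and 0 <= y + dy < n_col
--                          and matrix[x + dx][y + dy] <= matrix[x][y])
--                 for y in range(n_col)]
--                for x in range(n_row)]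
--     return sum(matrix[x][y] + 1
--                for x in range(n_row) for y in range(n_col)
--                if low[x][y])
-- ===== Notes on version B (the rewrite author's own statement) =====
-- stated objective: faster
-- what changed: A tests each cell with a per-cell generator over its filtered neighbours; B instead makes four whole-grid direction sweeps that clear a boolean lowest-cell mask and then sums matrix[x][y]+1 over the cells still marked.
import Mathlib
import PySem

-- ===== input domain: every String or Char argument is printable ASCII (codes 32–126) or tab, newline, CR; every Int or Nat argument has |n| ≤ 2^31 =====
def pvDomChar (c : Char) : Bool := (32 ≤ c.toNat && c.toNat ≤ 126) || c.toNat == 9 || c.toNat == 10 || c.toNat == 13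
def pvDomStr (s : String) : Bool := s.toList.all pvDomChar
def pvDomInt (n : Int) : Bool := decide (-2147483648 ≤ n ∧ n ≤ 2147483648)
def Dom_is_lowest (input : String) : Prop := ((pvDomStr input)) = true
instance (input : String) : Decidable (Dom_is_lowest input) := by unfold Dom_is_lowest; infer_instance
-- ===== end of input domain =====

-- Program equivalence: A checks each cell's neighbours with a per-cell generator; B instead makes
-- four whole-grid direction sweeps clearing a boolean lowest-cell mask and sums over the surviving cells
-- (objective: faster by a constant factor on CPython by dropping the per-cell generator/filter
-- machinery; the theorems below prove only value equivalence on Pre_).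


-- ===== PORT A =====
-- both Pythons parse with the identical comprehension, so the parser is one shared helper
def pvParse (input : String) : List (List Int) :=
  (PySem.Chars.splitOn (PySem.Chars.strip input.toList) ['\n']).map
    (fun row => row.map (fun c => (PySem.Int.ofChars? [c]).getD 0))

-- matrix[x][y]; in-bounds on every admitted input (Pre_ excludes the IndexError inputs)
def pvAt (m : List (List Int)) (x y : Int) : Int :=
  PySem.List.pyGetD (PySem.List.pyGetD m x []) y 0

-- find_adjacents((x, y)) as a list (the generator is consumed once, in order)
def pvAdjacents (p : Int × Int) : List (Int × Int) :=
  [((-1 : Int), (0 : Int)), (1, 0), (0, -1), (0, 1)].map (fun d => (p.1 + d.1, p.2 + d.2))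

def is_lowest (input : String) : Int :=
  let matrix := pvParse input
  let nRow : Int := matrix.length
  let nCol : Int := (PySem.List.pyGetD matrix 0 []).length
  ((PySem.List.pyRange 0 nRow 1).flatMap
      (fun x => (PySem.List.pyRange 0 nCol 1).map (fun y => (x, y)))).foldl
    (fun total p =>
      if ((pvAdjacents p).filter
            (fun q => decide (0 ≤ q.1) && decide (q.1 < nRow) && decide (0 ≤ q.2) && decide (q.2 < nCol))).all
          (fun q => decide (pvAt matrix p.1 p.2 < pvAt matrix q.1 q.2))
      then total + (pvAt matrix p.1 p.2 + 1) else total)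
    0

-- ===== PORT B =====
def pvLowAt (low : List (List Bool)) (x y : Int) : Bool :=
  PySem.List.pyGetD (PySem.List.pyGetD low x []) y true

def is_lowest_alt (input : String) : Int :=
  let matrix := pvParse input
  let nRow : Int := matrix.length
  let nCol : Int := (PySem.List.pyGetD matrix 0 []).length
  let low0 : List (List Bool) :=
    (PySem.List.pyRange 0 nRow 1).map (fun _ => PySem.List.pyRepeat [true] nCol)
  let low : List (List Bool) :=
    [((-1 : Int), (0 : Int)), (1, 0), (0, -1), (0, 1)].foldl
      (fun low d =>
        (PySem.List.pyRange 0 nRow 1).map (fun x =>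
          (PySem.List.pyRange 0 nCol 1).map (fun y =>
            pvLowAt low x y &&
              !(decide (0 ≤ x + d.1) && decide (x + d.1 < nRow) &&
                decide (0 ≤ y + d.2) && decide (y + d.2 < nCol) &&
                decide (pvAt matrix (x + d.1) (y + d.2) ≤ pvAt matrix x y)))))
      low0
  ((PySem.List.pyRange 0 nRow 1).flatMap
      (fun x => (PySem.List.pyRange 0 nCol 1).map (fun y => (x, y)))).foldl
    (fun total p => if pvLowAt low p.1 p.2 then total + (pvAt matrix p.1 p.2 + 1) else total)
    0

-- ===== PRECONDITION & SPEC =====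
-- Pre_ excludes exactly the inputs on which A raises: a non-digit character (ValueError in int(col))
-- or a row shorter than the first row (IndexError at matrix[x][y]).
def Pre_is_lowest (input : String) : Prop :=
  ((PySem.Chars.splitOn (PySem.Chars.strip input.toList) ['\n']).all (fun r =>
      r.all (fun c => 48 ≤ c.toNat && c.toNat ≤ 57) &&
      ((PySem.Chars.splitOn (PySem.Chars.strip input.toList) ['\n']).headD []).length ≤ r.length)) = true
instance (input : String) : Decidable (Pre_is_lowest input) := by unfold Pre_is_lowest; infer_instance

def pvWitness_is_lowest : String := "219\n398"

def Spec_is_lowest (input : String) (out : Int) : Prop := out = is_lowest_alt input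
instance (input : String) (out : Int) : Decidable (Spec_is_lowest input out) := by unfold Spec_is_lowest; infer_instance

-- ===== CLAIM (what is proved, stated in full; the proofs are below) =====
def Claim_equal_is_lowest : Prop := ∀ (input : String), Dom_is_lowest input → Pre_is_lowest input → Spec_is_lowest input (is_lowest input)

-- ===== LEMMAS AND PROOFS =====

lemma dir_eq (g : Bool) (u v : Int) : (!(g && decide (v ≤ u))) = (!g || decide (u < v)) := by
  cases g <;> by_cases h : v ≤ u <;> first | (simp [h]; omega) | simp [h]

lemma pvLowAt_grid (h : Int → Int → Bool) (nRow nCol x y : Int)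
    (hx0 : 0 ≤ x) (hx1 : x < nRow) (hy0 : 0 ≤ y) (hy1 : y < nCol) :
    pvLowAt ((PySem.List.pyRange 0 nRow 1).map
      (fun a => (PySem.List.pyRange 0 nCol 1).map (fun b => h a b))) x y = h x y := by
  unfold pvLowAt
  rw [PySem.List.pyGetD_map_pyRange_of_nonneg _ nRow x _ hx0 hx1,
      PySem.List.pyGetD_map_pyRange_of_nonneg _ nCol y _ hy0 hy1]

lemma pvLowAt_init (nRow nCol x y : Int)
    (hx0 : 0 ≤ x) (hx1 : x < nRow) (hy0 : 0 ≤ y) (hy1 : y < nCol) :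
    pvLowAt ((PySem.List.pyRange 0 nRow 1).map
      (fun _ => PySem.List.pyRepeat [true] nCol)) x y = true := by
  unfold pvLowAt
  rw [PySem.List.pyGetD_map_pyRange_of_nonneg _ nRow x _ hx0 hx1, PySem.List.pyRepeat_singleton,
      PySem.List.pyGetD_eq_getElem (h0 := hy0) (h1 := by simp; omega)]
  simp

lemma cond_eq (m : List (List Int)) (nRow nCol x y : Int)
    (hx0 : 0 ≤ x) (hx1 : x < nRow) (hy0 : 0 ≤ y) (hy1 : y < nCol) :
    pvLowAt
      ([((-1 : Int), (0 : Int)), (1, 0), (0, -1), (0, 1)].foldl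
        (fun low d =>
          (PySem.List.pyRange 0 nRow 1).map (fun x =>
            (PySem.List.pyRange 0 nCol 1).map (fun y =>
              pvLowAt low x y &&
                !(decide (0 ≤ x + d.1) && decide (x + d.1 < nRow) &&
                  decide (0 ≤ y + d.2) && decide (y + d.2 < nCol) &&
                  decide (pvAt m (x + d.1) (y + d.2) ≤ pvAt m x y)))))
        ((PySem.List.pyRange 0 nRow 1).map (fun _ => PySem.List.pyRepeat [true] nCol))) x y
    = ((pvAdjacents (x, y)).filter
        (fun q => decide (0 ≤ q.1) && decide (q.1 < nRow) && decide (0 ≤ q.2) && decide (q.2 < nCol))).all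
        (fun q => decide (pvAt m x y < pvAt m q.1 q.2)) := by
  simp only [List.foldl_cons, List.foldl_nil]
  rw [pvLowAt_grid _ _ _ _ _ hx0 hx1 hy0 hy1, pvLowAt_grid _ _ _ _ _ hx0 hx1 hy0 hy1,
      pvLowAt_grid _ _ _ _ _ hx0 hx1 hy0 hy1, pvLowAt_grid _ _ _ _ _ hx0 hx1 hy0 hy1,
      pvLowAt_init _ _ _ _ hx0 hx1 hy0 hy1]
  rw [List.all_filter]
  simp only [pvAdjacents, List.map_cons, List.map_nil, List.all_cons, List.all_nil, dir_eq]
  simp [Bool.and_assoc]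

-- ===== VERDICT (by name: the statement is the Claim_ definition above) =====
theorem is_lowest_spec : Claim_equal_is_lowest := by
  intro input _ _
  unfold Spec_is_lowest is_lowest is_lowest_alt
  apply PySem.List.foldl_congr_mem
  intro acc p hp
  simp only [List.mem_flatMap, List.mem_map, PySem.List.mem_pyRange_one] at hp
  obtain ⟨x, ⟨hx0, hx1⟩, y, ⟨hy0, hy1⟩, rfl⟩ := hp
  rw [cond_eq _ _ _ _ _ hx0 hx1 hy0 hy1]
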